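-- pv_equiv track=rewrite | github.com/statropy/aoc-2020 | day16.py | valid_ticket
-- ===== SOURCE A (Python) =====
-- def valid_ticket(fields, ticket):
--     for v in ticket:
--         isvalid = False
--         for valid in fields.values():
--             if v in valid:
--                 isvalid = True
--                 break
--         if not isvalid:
--             return False
--     return True
-- ===== SOURCE B (Python) =====
-- def valid_ticket(fields, ticket):
--     valid = set().union(*fields.values())
--     return all(v in valid for v in ticket)
-- ===== Notes on version B (the rewrite author's own statement) =====
-- stated objective: simpler
-- what changed: Builds one union set of all fields' valid values up front, then checks the ticket in a single flat pass with set membership, instead of re-scanning every field's value list for each ticket value.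
import Mathlib
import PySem

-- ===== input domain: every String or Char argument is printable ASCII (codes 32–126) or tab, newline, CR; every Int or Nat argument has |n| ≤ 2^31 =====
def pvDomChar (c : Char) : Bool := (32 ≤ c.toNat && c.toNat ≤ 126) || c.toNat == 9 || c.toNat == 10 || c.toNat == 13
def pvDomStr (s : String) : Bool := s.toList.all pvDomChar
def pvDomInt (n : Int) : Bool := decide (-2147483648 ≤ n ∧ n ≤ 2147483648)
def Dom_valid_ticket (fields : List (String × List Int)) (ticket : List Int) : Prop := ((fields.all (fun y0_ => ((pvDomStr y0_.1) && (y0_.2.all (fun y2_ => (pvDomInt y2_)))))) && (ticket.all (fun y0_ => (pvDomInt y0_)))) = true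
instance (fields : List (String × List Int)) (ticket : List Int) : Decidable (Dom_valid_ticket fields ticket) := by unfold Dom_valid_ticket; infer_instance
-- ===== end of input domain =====

-- B builds one union set of all fields' values and checks the ticket in a single flat pass (simpler; return value only, no mutation involved).

-- ===== PORT A =====
-- inner 'for valid in fields.values(): if v in valid: isvalid = True; break'
def validTicketInner (v : Int) : List (String × List Int) → Bool
  | [] => false
  | f :: rest => if f.2.contains v then true else validTicketInner v rest

def valid_ticket (fields : List (String × List Int)) (ticket : List Int) : Bool :=
  match ticket with
  | [] => true
  | v :: rest => if ¬ validTicketInner v fields then false else valid_ticket fields rest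

-- ===== PORT B =====
def valid_ticket_alt (fields : List (String × List Int)) (ticket : List Int) : Bool :=
  -- valid = set().union(*fields.values())
  let valid : PySem.Set Int := fields.foldl (fun s f => PySem.Set.update s f.2) PySem.Set.empty
  -- all(v in valid for v in ticket)
  ticket.all (fun v => PySem.Set.contains valid v)

-- ===== PRECONDITION & SPEC =====
def Spec_valid_ticket (fields : List (String × List Int)) (ticket : List Int) (out : Bool) : Prop := out = valid_ticket_alt fields ticket
instance (fields : List (String × List Int)) (ticket : List Int) (out : Bool) : Decidable (Spec_valid_ticket fields ticket out) := by unfold Spec_valid_ticket; infer_instance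

-- ===== CLAIM (what is proved, stated in full; the proofs are below) =====
def Claim_equal_valid_ticket : Prop := ∀ (fields : List (String × List Int)) (ticket : List Int), Dom_valid_ticket fields ticket → Spec_valid_ticket fields ticket (valid_ticket fields ticket)

-- ===== LEMMAS AND PROOFS =====

theorem contains_update (s : PySem.Set Int) (l : List Int) (v : Int) :
    PySem.Set.contains (PySem.Set.update s l) v = (PySem.Set.contains s v || l.contains v) := by
  induction l generalizing s with
  | nil => simp [PySem.Set.update]
  | cons x xs ih =>
      simp only [PySem.Set.update, List.foldl_cons, List.contains_cons]
      rw [show (xs.foldl PySem.Set.add (PySem.Set.add s x)) = PySem.Set.update (PySem.Set.add s x) xs from rfl, ih]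
      simp [PySem.Set.contains, PySem.Set.mem_add, Bool.or_assoc, beq_eq_decide]

theorem contains_union (fields : List (String × List Int)) (s : PySem.Set Int) (v : Int) :
    PySem.Set.contains (fields.foldl (fun s f => PySem.Set.update s f.2) s) v
      = (PySem.Set.contains s v || validTicketInner v fields) := by
  induction fields generalizing s with
  | nil => simp [validTicketInner]
  | cons f fs ih =>
      simp only [List.foldl_cons, ih, validTicketInner, contains_update]
      simp [Bool.or_assoc]

theorem valid_ticket_eq_all (fields : List (String × List Int)) (ticket : List Int) :
    valid_ticket fields ticket = ticket.all (fun v => validTicketInner v fields) := by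
  induction ticket with
  | nil => simp [valid_ticket]
  | cons v rest ih =>
      simp only [valid_ticket, List.all_cons, ih]
      by_cases h : validTicketInner v fields <;> simp [h]

-- ===== VERDICT (by name: the statement is the Claim_ definition above) =====
theorem valid_ticket_spec : Claim_equal_valid_ticket := by
  intro fields ticket _
  unfold Spec_valid_ticket valid_ticket_alt
  rw [valid_ticket_eq_all]
  simp only [contains_union]
  congr 1
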